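-- pv_equiv track=rewrite | github.com/rohithpr/AS-SORT | assort.py | get_worst_case
-- ===== SOURCE A (Python) =====
-- def get_worst_case(n):
-- 	''' (int) -> list
-- 	Returns a list which is the worst case for this sorting algorithm.
-- 	(Worst case if you don't use heapify)
-- 	'''
-- 	l = []
-- 	j = 0
-- 	for i in range(n):
-- 		if i%2==0:
-- 			l.append(j)
-- 		else:
-- 			l.append(n-j-1)
-- 			j += 1
-- 	return l
-- ===== SOURCE B (Python) =====
-- def get_worst_case(n):
--     asc = list(range((n + 1) // 2))
--     desc = [n - 1 - k for k in range(n // 2)]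
--     out = []
--     for k in asc:
--         out.append(k)
--         if k < len(desc):
--             out.append(desc[k])
--     return out
-- ===== Notes on version B (the rewrite author's own statement) =====
-- stated objective: alternative
-- what changed: Replaces the single stateful loop (with its parity branch and running counter j) by constructing the ascending and descending halves as two explicit range-based sequences and merging them block-wise.
import Mathlib
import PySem

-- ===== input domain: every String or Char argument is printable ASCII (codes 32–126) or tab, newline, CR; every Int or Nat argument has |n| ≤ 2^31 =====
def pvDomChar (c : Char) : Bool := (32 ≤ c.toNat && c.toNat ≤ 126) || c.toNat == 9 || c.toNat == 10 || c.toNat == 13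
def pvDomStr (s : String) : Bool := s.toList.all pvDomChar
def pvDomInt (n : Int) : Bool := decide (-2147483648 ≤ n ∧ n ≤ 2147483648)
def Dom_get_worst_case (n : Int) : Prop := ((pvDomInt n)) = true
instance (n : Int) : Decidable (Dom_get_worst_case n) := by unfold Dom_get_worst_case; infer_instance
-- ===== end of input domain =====

-- B builds the ascending and descending halves as two range sequences and merges them, instead of A's
-- single stateful loop with a parity branch and a running counter; same O(n) cost, different decomposition.

-- ===== PORT A =====
def get_worst_case (n : Int) : List Int :=
  (((PySem.List.pyRange 0 n 1).foldl (fun (st : List Int × Int) i =>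
      if PySem.Int.mod i 2 = 0 then (st.1 ++ [st.2], st.2)
      else (st.1 ++ [n - st.2 - 1], st.2 + 1)) ([], 0))).1

-- ===== PORT B =====
def get_worst_case_alt (n : Int) : List Int :=
  let asc := PySem.List.pyRange 0 (PySem.Int.floordiv (n + 1) 2) 1
  let desc := (PySem.List.pyRange 0 (PySem.Int.floordiv n 2) 1).map (fun k => n - 1 - k)
  asc.foldl (fun out k =>
    let out := out ++ [k]
    if k < (desc.length : Int) then out ++ [PySem.List.pyGetD desc k 0] else out) []

-- ===== PRECONDITION & SPEC =====
def Spec_get_worst_case (n : Int) (out : List Int) : Prop := out = get_worst_case_alt n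
instance (n : Int) (out : List Int) : Decidable (Spec_get_worst_case n out) := by unfold Spec_get_worst_case; infer_instance

-- ===== CLAIM (what is proved, stated in full; the proofs are below) =====
def Claim_equal_get_worst_case : Prop := ∀ (n : Int), Dom_get_worst_case n → Spec_get_worst_case n (get_worst_case n)

-- ===== LEMMAS AND PROOFS =====

-- closed-form element at position i (i : Nat), for a fixed parameter n
def pvF (n : Int) (i : Nat) : Int := if i % 2 = 0 then (↑(i / 2) : Int) else n - ↑(i / 2) - 1

-- A's loop invariant: after m iterations the list is the closed form and j = m/2
theorem pvA_fold (n : Int) (m : Nat) :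
    (List.range m).foldl (fun (st : List Int × Int) (k : Nat) =>
        if PySem.Int.mod (↑k) 2 = 0 then (st.1 ++ [st.2], st.2)
        else (st.1 ++ [n - st.2 - 1], st.2 + 1)) ([], 0)
      = ((List.range m).map (pvF n), (↑(m / 2) : Int)) := by
  induction m with
  | zero => simp
  | succ m ih =>
    rw [List.range_succ, List.foldl_append, ih, List.map_append]
    have hmod : PySem.Int.mod (↑m) 2 = ((m % 2 : Nat) : Int) := PySem.Int.mod_natCast m 2
    rcases Nat.even_or_odd m with he | ho
    · obtain ⟨t, ht⟩ := he
      have h2 : m % 2 = 0 := by omega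
      have hcond : PySem.Int.mod (↑m) 2 = 0 := by rw [hmod, h2]; rfl
      have hf : pvF n m = (↑(m / 2) : Int) := by unfold pvF; simp [h2]
      have h3 : (m + 1) / 2 = m / 2 := by omega
      simp only [List.foldl_cons, List.foldl_nil, if_pos hcond]
      simp [hf, h3]
    · obtain ⟨t, ht⟩ := ho
      have h2 : m % 2 = 1 := by omega
      have hcond : ¬ (PySem.Int.mod (↑m) 2 = 0) := by rw [hmod, h2]; decide
      have hf : pvF n m = n - (↑(m / 2) : Int) - 1 := by unfold pvF; simp [h2]
      have h3 : (m + 1) / 2 = m / 2 + 1 := by omega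
      simp only [List.foldl_cons, List.foldl_nil, if_neg hcond]
      simp [hf, h3]

theorem pvF_even (n : Int) (d : Nat) : pvF n (2 * d) = (↑d : Int) := by
  unfold pvF; simp [Nat.mul_div_cancel_left d (by norm_num : 0 < 2)]

theorem pvF_odd (n : Int) (d : Nat) : pvF n (2 * d + 1) = n - 1 - ↑d := by
  unfold pvF
  have h1 : (2 * d + 1) % 2 = 1 := by omega
  have h4 : (2 * d + 1) / 2 = d := by omega
  rw [h1, h4]
  norm_num
  ring

-- B's merge, even case: d full blocks give the closed form of length 2d
theorem pvB_even (n : Int) (d : Nat) :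
    (List.range d).flatMap (fun k : Nat =>
        if (↑k : Int) < (↑d : Int) then [(↑k : Int), n - 1 - ↑k] else [(↑k : Int)])
      = (List.range (2 * d)).map (pvF n) := by
  induction d with
  | zero => simp
  | succ d ih =>
    rw [List.range_succ, List.flatMap_append]
    have hcong : (List.range d).flatMap (fun k : Nat =>
        if (↑k : Int) < (↑(d+1) : Int) then [(↑k : Int), n - 1 - ↑k] else [(↑k : Int)])
      = (List.range d).flatMap (fun k : Nat =>
        if (↑k : Int) < (↑d : Int) then [(↑k : Int), n - 1 - ↑k] else [(↑k : Int)]) := by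
      unfold List.flatMap
      congr 1
      apply List.map_congr_left
      intro k hk
      have hk' : k < d := List.mem_range.mp hk
      have h1 : (↑k : Int) < (↑(d+1) : Int) := by exact_mod_cast Nat.lt_succ_of_lt hk'
      have h2 : (↑k : Int) < (↑d : Int) := by exact_mod_cast hk'
      rw [if_pos h1, if_pos h2]
    rw [hcong, ih]
    have h2d : 2 * (d + 1) = (2 * d + 1) + 1 := by ring
    rw [h2d, List.range_succ, List.range_succ, List.map_append, List.map_append, List.append_assoc]
    have hdlt : (↑d : Int) < (↑(d+1) : Int) := by exact_mod_cast Nat.lt_succ_self d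
    simp [pvF_even, pvF_odd]

-- B's merge, odd case: d full blocks plus a lone ascending element
theorem pvB_odd (n : Int) (d : Nat) :
    (List.range (d + 1)).flatMap (fun k : Nat =>
        if (↑k : Int) < (↑d : Int) then [(↑k : Int), n - 1 - ↑k] else [(↑k : Int)])
      = (List.range (2 * d + 1)).map (pvF n) := by
  rw [List.range_succ, List.flatMap_append, pvB_even n d, List.range_succ, List.map_append]
  simp [pvF_even]

-- B's value as a flatMap of blocks over the ascending range (c = len(asc), d = len(desc))
theorem pvB_eq_flatMap (n : Int) (c d : Nat)
    (hc : PySem.Int.floordiv (n + 1) 2 = (↑c : Int))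
    (hd : PySem.Int.floordiv n 2 = (↑d : Int)) :
    get_worst_case_alt n
      = (List.range c).flatMap (fun k : Nat =>
          if (↑k : Int) < (↑d : Int) then [(↑k : Int), n - 1 - ↑k] else [(↑k : Int)]) := by
  unfold get_worst_case_alt
  simp only [hc, hd]
  rw [PySem.List.pyRange_one 0 (↑c), PySem.List.pyRange_one 0 (↑d)]
  simp only [sub_zero, Int.toNat_natCast, zero_add]
  rw [List.foldl_map]
  have hbody : (fun (x : List Int) (y : Nat) =>
      if (↑y : Int) < ((((List.range d).map (fun k : Nat => (↑k : Int))).map (fun k => n - 1 - k)).length : Int)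
      then x ++ [(↑y : Int)] ++ [PySem.List.pyGetD (((List.range d).map (fun k : Nat => (↑k : Int))).map (fun k => n - 1 - k)) (↑y) 0]
      else x ++ [(↑y : Int)])
    = (fun (x : List Int) (y : Nat) =>
        x ++ (if (↑y : Int) < (↑d : Int) then [(↑y : Int), n - 1 - ↑y] else [(↑y : Int)])) := by
    funext x y
    simp only [List.length_map, List.length_range]
    by_cases h : (↑y : Int) < (↑d : Int)
    · have hk : y < d := by exact_mod_cast h
      have hget : PySem.List.pyGetD (((List.range d).map (fun k : Nat => (↑k : Int))).map (fun k => n - 1 - k)) (↑y) 0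
          = n - 1 - ↑y := by
        rw [PySem.List.pyGetD_natCast]
        simp [List.getD, hk]
      rw [hget]
      simp [h]
    · simp [h]
  rw [hbody, PySem.List.foldl_append_eq_flatMap]
  simp

-- ===== VERDICT (by name: the statement is the Claim_ definition above) =====
theorem get_worst_case_spec : Claim_equal_get_worst_case := by
  intro n _
  unfold Spec_get_worst_case
  by_cases hn : n ≤ 0
  · -- both loops are over empty ranges
    have hA : get_worst_case n = [] := by
      unfold get_worst_case
      rw [PySem.List.pyRange_one_eq_nil hn]
      rfl
    have hfd : PySem.Int.floordiv (n + 1) 2 ≤ 0 := by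
      rw [PySem.Int.floordiv_eq_ediv_of_pos (by norm_num)]; omega
    have hB : get_worst_case_alt n = [] := by
      unfold get_worst_case_alt
      rw [PySem.List.pyRange_one_eq_nil hfd]
      rfl
    rw [hA, hB]
  · rw [not_le] at hn
    obtain ⟨m, hm⟩ : ∃ m : Nat, n = (↑m : Int) := ⟨n.toNat, by omega⟩
    subst hm
    set c : Nat := (m + 1) / 2 with hcdef
    set d : Nat := m / 2 with hddef
    have hc : PySem.Int.floordiv ((↑m : Int) + 1) 2 = (↑c : Int) := by
      rw [PySem.Int.floordiv_eq_ediv_of_pos (by norm_num)]; omega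
    have hd : PySem.Int.floordiv (↑m : Int) 2 = (↑d : Int) := by
      rw [PySem.Int.floordiv_eq_ediv_of_pos (by norm_num)]; omega
    -- A's side
    have hA : get_worst_case (↑m) = (List.range m).map (pvF (↑m)) := by
      unfold get_worst_case
      rw [PySem.List.pyRange_one 0 (↑m)]
      simp only [sub_zero, Int.toNat_natCast, zero_add]
      rw [List.foldl_map]
      have := pvA_fold (↑m : Int) m
      rw [this]
    -- B's side
    rw [hA, pvB_eq_flatMap (↑m) c d hc hd]
    rcases Nat.even_or_odd m with he | ho
    · obtain ⟨t, ht⟩ := he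
      have hcd : c = d := by omega
      have h2d : 2 * d = m := by omega
      rw [hcd, pvB_even, h2d]
    · obtain ⟨t, ht⟩ := ho
      have hcd : c = d + 1 := by omega
      have h2d : 2 * d + 1 = m := by omega
      rw [hcd, pvB_odd, h2d]
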